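-- pv_equiv track=rewrite | github.com/jcccaz/Korum-Command- | engine_v2.py | _critical_data_missing
-- ===== SOURCE A (Python) =====
-- def _verified_fact_count(verified_claims):
--     count = 0
--     for claim in verified_claims or []:
--         if not isinstance(claim, dict):
--             continue
--         status = str(claim.get("status") or "").strip().upper()
--         if status in ("VERIFIED", "ACCURATE"):
--             count += 1
--     return count
--
-- def _critical_data_missing(verified_claims, evidence_trace, unknowns):
--     verified_count = _verified_fact_count(verified_claims)
--     evidence_count = len([item for item in (evidence_trace or []) if str(item).strip()])
--     if verified_count == 0 or evidence_count == 0: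
--         return True
--
--     unknown_text = " ".join(str(item).strip().lower() for item in (unknowns or []) if str(item).strip())
--     critical_markers = (
--         "baseline", "probability", "projection", "forecast", "cost", "budget",
--         "timeline", "frequency", "churn", "latency", "outage", "failure threshold",
--     )
--     return any(marker in unknown_text for marker in critical_markers)
-- ===== SOURCE B (Python) =====
-- _CRITICAL_MARKERS = (
--     "baseline", "probability", "projection", "forecast", "cost", "budget",
--     "timeline", "frequency", "churn", "latency", "outage", "failure threshold",
-- )
--
-- def _critical_data_missing(verified_claims, evidence_trace, unknowns):
--     # Early-return guard loops (no counting), then a single left-to-right scan of the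
--     # unknown text testing whether any marker starts at each position, instead of
--     # twelve independent substring searches.
--     for claim in (verified_claims or []):
--         if isinstance(claim, dict) and \
--                 str(claim.get("status") or "").strip().upper() in ("VERIFIED", "ACCURATE"):
--             break
--     else:
--         return True
--     for item in (evidence_trace or []):
--         if str(item).strip():
--             break
--     else:
--         return True
--     text = " ".join(str(item).strip().lower() for item in (unknowns or []) if str(item).strip())
--     for i in range(len(text)):
--         if any(text.startswith(m, i) for m in _CRITICAL_MARKERS):
--             return True
--     return False
-- ===== Notes on version B (the rewrite author's own statement) =====
-- stated objective: alternative
-- what changed: Replaces the helper's tallied integer counts with inlined early-return existence loops, and inverts the marker search: instead of running a separate substring search per marker, B scans the unknown text once and tests at each position whether some marker starts there (correct because every marker is non-empty).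
import Mathlib
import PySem

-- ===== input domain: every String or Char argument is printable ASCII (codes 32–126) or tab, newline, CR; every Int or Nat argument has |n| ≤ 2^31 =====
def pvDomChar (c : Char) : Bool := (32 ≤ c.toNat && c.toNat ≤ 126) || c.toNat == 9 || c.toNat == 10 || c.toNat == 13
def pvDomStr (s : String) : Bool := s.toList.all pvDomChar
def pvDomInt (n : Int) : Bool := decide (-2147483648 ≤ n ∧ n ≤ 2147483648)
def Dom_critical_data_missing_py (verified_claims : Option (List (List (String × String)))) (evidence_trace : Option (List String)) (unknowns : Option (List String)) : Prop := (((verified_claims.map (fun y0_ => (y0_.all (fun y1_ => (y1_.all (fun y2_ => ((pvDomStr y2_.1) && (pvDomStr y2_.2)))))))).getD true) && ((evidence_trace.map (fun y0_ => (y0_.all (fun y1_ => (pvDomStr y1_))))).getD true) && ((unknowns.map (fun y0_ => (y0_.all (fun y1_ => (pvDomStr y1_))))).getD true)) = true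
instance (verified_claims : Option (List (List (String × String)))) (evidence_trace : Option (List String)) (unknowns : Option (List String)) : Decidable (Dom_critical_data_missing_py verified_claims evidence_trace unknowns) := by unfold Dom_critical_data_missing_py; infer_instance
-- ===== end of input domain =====

-- B inlines the helper as early-return existence loops (no tallied counts) and inverts the
-- marker search: one left-to-right position scan of the unknown text testing whether some
-- marker starts at each position, instead of one substring search per marker. Objective: alternative.

-- ===== PORT A =====
-- status check of A's helper: claim.get("status") or "" → strip → upper → in ("VERIFIED","ACCURATE")
-- (Source B uses the identical predicate, so the helper is shared by both ports)
def pvStatusOk (claim : List (String × String)) : Bool :=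
  let status := PySem.Str.upper (PySem.Str.strip (((PySem.Dict.mk claim).get? "status").getD ""))
  status == "VERIFIED" || status == "ACCURATE"

def pvMarkers : List String :=
  ["baseline", "probability", "projection", "forecast", "cost", "budget",
   "timeline", "frequency", "churn", "latency", "outage", "failure threshold"]

-- _verified_fact_count: running integer count (isinstance is always true under the type convention)
def pvVerifiedFactCount (verified_claims : Option (List (List (String × String)))) : Nat :=
  (verified_claims.getD []).foldl (fun count claim => if pvStatusOk claim then count + 1 else count) 0

def critical_data_missing_py (verified_claims : Option (List (List (String × String)))) (evidence_trace : Option (List String)) (unknowns : Option (List String)) : Bool :=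
  let verified_count := pvVerifiedFactCount verified_claims
  let evidence_count := ((evidence_trace.getD []).filter (fun item => !(PySem.Str.strip item == ""))).length
  if verified_count == 0 || evidence_count == 0 then true
  else
    let unknown_text := PySem.Str.join " "
      (((unknowns.getD []).filter (fun item => !(PySem.Str.strip item == ""))).map
        (fun item => PySem.Str.lower (PySem.Str.strip item)))
    pvMarkers.any (fun m => PySem.Str.isIn m unknown_text)

-- ===== PORT B =====
-- the two for/break/else guard loops of Source B are existence scans, ported as .any;
-- text.startswith(m, i) with 0 ≤ i ≤ len(text) is exactly 'm is a prefix of text[i:]',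
-- ported by hand as PySem.Chars.startswith on the dropped character list.
def critical_data_missing_py_alt (verified_claims : Option (List (List (String × String)))) (evidence_trace : Option (List String)) (unknowns : Option (List String)) : Bool :=
  if !((verified_claims.getD []).any pvStatusOk) then true
  else if !((evidence_trace.getD []).any (fun item => !(PySem.Str.strip item == ""))) then true
  else
    let text := PySem.Str.join " "
      (((unknowns.getD []).filter (fun item => !(PySem.Str.strip item == ""))).map
        (fun item => PySem.Str.lower (PySem.Str.strip item)))
    (PySem.List.pyRange 0 (PySem.Str.len text) 1).any (fun i =>
      pvMarkers.any (fun m => PySem.Chars.startswith (text.toList.drop i.toNat) m.toList))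

-- ===== PRECONDITION & SPEC =====
def Spec_critical_data_missing_py (verified_claims : Option (List (List (String × String)))) (evidence_trace : Option (List String)) (unknowns : Option (List String)) (out : Bool) : Prop := out = critical_data_missing_py_alt verified_claims evidence_trace unknowns
instance (verified_claims : Option (List (List (String × String)))) (evidence_trace : Option (List String)) (unknowns : Option (List String)) (out : Bool) : Decidable (Spec_critical_data_missing_py verified_claims evidence_trace unknowns out) := by unfold Spec_critical_data_missing_py; infer_instance

-- ===== CLAIM (what is proved, stated in full; the proofs are below) =====
def Claim_equal_critical_data_missing_py : Prop := ∀ (verified_claims : Option (List (List (String × String)))) (evidence_trace : Option (List String)) (unknowns : Option (List String)), Dom_critical_data_missing_py verified_claims evidence_trace unknowns → Spec_critical_data_missing_py verified_claims evidence_trace unknowns (critical_data_missing_py verified_claims evidence_trace unknowns)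

-- ===== LEMMAS AND PROOFS =====

-- A's count-up-from-n loop is n + countP
theorem pv_foldl_count {α : Type} (p : α → Bool) (l : List α) (n : Nat) :
    l.foldl (fun c x => if p x then c + 1 else c) n = n + l.countP p := by
  induction l generalizing n with
  | nil => simp
  | cons a t ih =>
      by_cases h : p a <;> simp [List.countP_cons, h, ih] <;> omega

theorem pv_countP_zero {α : Type} (p : α → Bool) (l : List α) :
    (l.countP p == 0) = !(l.any p) := by
  induction l with
  | nil => simp
  | cons a t ih =>
      by_cases h : p a <;> simp [List.countP_cons, h, ih]

-- every marker is a non-empty string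
theorem pv_markers_ne_nil : ∀ m ∈ pvMarkers, m.toList ≠ [] := by decide

-- the position scan of B finds a marker iff some marker is a substring (A's test):
-- correct because markers are non-empty, so a match starts at a position < len(text)
theorem pv_marker_scan (text : String) :
    (PySem.List.pyRange 0 (PySem.Str.len text) 1).any (fun i =>
        pvMarkers.any (fun m => PySem.Chars.startswith (text.toList.drop i.toNat) m.toList))
      = pvMarkers.any (fun m => PySem.Str.isIn m text) := by
  apply Bool.eq_iff_iff.mpr
  simp only [List.any_eq_true, PySem.Chars.startswith_iff, PySem.Str.isIn_iff_infix]
  constructor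
  · rintro ⟨i, _, m, hm, hpre⟩
    exact ⟨m, hm, hpre.isInfix.trans (List.drop_suffix _ _).isInfix⟩
  · rintro ⟨m, hm, hinf⟩
    have : ∃ j, m.toList <+: text.toList.drop j := by
      obtain ⟨p, s, h⟩ := hinf
      exact ⟨p.length, by rw [← h]; simp⟩
    obtain ⟨j, hj⟩ := this
    have hlt : j < text.toList.length := by
      by_contra h
      push_neg at h
      rw [List.drop_eq_nil_of_le h, List.prefix_nil] at hj
      exact pv_markers_ne_nil m hm hj
    refine ⟨(j : Int), ?_, m, hm, ?_⟩
    · rw [PySem.List.mem_pyRange_one]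
      constructor
      · exact Int.natCast_nonneg j
      · simp [PySem.Str.len]
        exact_mod_cast hlt
    · simpa using hj

-- ===== VERDICT (by name: the statement is the Claim_ definition above) =====
theorem critical_data_missing_py_spec : Claim_equal_critical_data_missing_py := by
  intro vc et un _
  unfold Spec_critical_data_missing_py critical_data_missing_py critical_data_missing_py_alt
    pvVerifiedFactCount
  rw [pv_foldl_count, pv_marker_scan]
  have h1 := pv_countP_zero pvStatusOk (vc.getD [])
  have h2 := pv_countP_zero (fun i => !(PySem.Str.strip i == "")) (et.getD [])
  simp only [Nat.zero_add]
  rw [h1, ← List.countP_eq_length_filter, h2]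
  cases (vc.getD []).any pvStatusOk <;>
    cases (et.getD []).any (fun i => !(PySem.Str.strip i == "")) <;> simp
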